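-- pv_equiv track=rewrite | github.com/DailyCommitStudy/Lims-practice-repository | programmers/코딩 기초 트레이닝/day10_4.py | solution
-- ===== SOURCE A (Python) =====
-- def solution(my_string, m, c):
--     answer = ''
--     a = []                                                #
--     for i in range(len(my_string) // m):
--         a.append(list(my_string[i * m : i * m + m]))
--
--     for i in a:
--         answer += i[c - 1]                               # 각 리스트의 c-1에 위치한 것들을 가져다가 += 하여 추출함.
--     return answer
-- ===== SOURCE B (Python) =====
-- def solution(my_string, m, c):
--     k = len(my_string) // m
--     return my_string[c - 1 : k * m : m]
-- ===== Notes on version B (the rewrite author's own statement) =====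
-- stated objective: idiomatic
-- what changed: Replaces A's two passes (build a list of per-chunk character lists, then concatenate each chunk's (c-1)-th element) with a single strided slice my_string[c-1 : (len(my_string)//m)*m : m].
-- outside the precondition, e.g. on solution('abcd', 2, 0): A returns 'bd', B returns 'd'; on solution('abcd', 2, 3): A raises IndexError, B returns 'c'; on solution('abcd', 0, 1): A raises ZeroDivisionError, B raises ZeroDivisionError
import Mathlib
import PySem

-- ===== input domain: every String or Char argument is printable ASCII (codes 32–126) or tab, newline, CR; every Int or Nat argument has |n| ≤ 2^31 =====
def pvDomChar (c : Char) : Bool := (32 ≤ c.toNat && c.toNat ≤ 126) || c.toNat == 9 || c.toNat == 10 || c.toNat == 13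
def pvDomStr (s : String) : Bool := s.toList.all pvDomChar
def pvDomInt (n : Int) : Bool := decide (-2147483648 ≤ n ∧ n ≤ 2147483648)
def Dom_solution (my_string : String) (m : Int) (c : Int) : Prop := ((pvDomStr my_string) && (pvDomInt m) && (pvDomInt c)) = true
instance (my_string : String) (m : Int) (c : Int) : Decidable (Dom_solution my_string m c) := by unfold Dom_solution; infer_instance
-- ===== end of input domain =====

-- B replaces A's two loops (build per-chunk lists, then collect column c-1) by one strided
-- slice; equivalence is proved on the column domain stated in Pre_.

-- ===== PORT A =====
-- literal port of A: first loop builds the list `a` of length-m chunks, second loop appends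
-- each chunk's (c-1)-th character (in range under Pre_, so pyGetD's default is never used)
def solution (my_string : String) (m : Int) (c : Int) : String :=
  let L := my_string.toList
  let a : List (List Char) :=
    (PySem.List.pyRange 0 (PySem.Int.floordiv (PySem.Str.len my_string) m) 1).foldl
      (fun acc i => acc ++ [PySem.List.slice L (some (i * m)) (some (i * m + m))]) []
  let answer : List Char :=
    a.foldl (fun ans ch => ans ++ [PySem.List.pyGetD ch (c - 1) ' ']) []
  String.ofList answer

-- ===== PORT B =====
-- literal port of B: k = len // m, then the single strided slice my_string[c-1 : k*m : m]
def solution_alt (my_string : String) (m : Int) (c : Int) : String :=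
  let k := PySem.Int.floordiv (PySem.Str.len my_string) m
  String.ofList ((PySem.List.slice? my_string.toList (some (c - 1)) (some (k * m)) m).getD [])

-- ===== PRECONDITION & SPEC =====
-- Pre_ is the task's natural 1-indexed column domain 1 ≤ c ≤ m, widened by the two regions where
-- both programs return '' (m ≤ -1, or a string shorter than one chunk).  It excludes m = 0
-- (A raises ZeroDivisionError), c > m or c ≤ -m on strings with a full chunk (A raises
-- IndexError), and 1-m ≤ c ≤ 0 there, where A returns a column counted from the chunk's END via
-- Python negative indexing — an accident no caller of this 1-indexed extractor would rely on.
def Pre_solution (my_string : String) (m : Int) (c : Int) : Prop :=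
  (1 ≤ m ∧ 1 ≤ c ∧ c ≤ m) ∨ m ≤ -1 ∨ (1 ≤ m ∧ (my_string.toList.length : Int) < m)
instance (my_string : String) (m : Int) (c : Int) : Decidable (Pre_solution my_string m c) := by
  unfold Pre_solution; infer_instance
def pvWitness_solution : String × Int × Int := ("abcdef", 2, 2)
def Spec_solution (my_string : String) (m : Int) (c : Int) (out : String) : Prop :=
  out = solution_alt my_string m c
instance (my_string : String) (m : Int) (c : Int) (out : String) : Decidable (Spec_solution my_string m c out) := by
  unfold Spec_solution; infer_instance

-- ===== CLAIM (what is proved, stated in full; the proofs are below) =====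
def Claim_equal_solution : Prop := ∀ (my_string : String) (m : Int) (c : Int),
  Dom_solution my_string m c → Pre_solution my_string m c →
  Spec_solution my_string m c (solution my_string m c)

-- ===== LEMMAS AND PROOFS =====

-- for a negative divisor, floor division rounds down, so quotient times divisor is ≥ numerator
lemma pv_fdiv_mul_ge (n m : Int) (hm : m ≤ -1) :
    n ≤ PySem.Int.floordiv n m * m := by
  have h1 := PySem.Int.floordiv_mul_add_mod n m
  have h2 := PySem.Int.mod_neg_bounds n (b := m) (by omega)
  omega

-- filterMap collapses to map when every value is some
lemma pv_filterMap_eq_map {α β : Type} (l : List α) (f : α → Option β) (g : α → β)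
    (h : ∀ a ∈ l, f a = some (g a)) : l.filterMap f = l.map g := by
  induction l with
  | nil => rfl
  | cons x xs ih =>
      simp only [List.filterMap_cons, List.map_cons, h x (by simp)]
      exact congrArg _ (ih fun a ha => h a (List.mem_cons_of_mem _ ha))

-- B's slice? in the main case: the strided slice reads exactly column C-1 of each full chunk
lemma pv_sliceB (L : List Char) (M C : ℕ) (h1 : 1 ≤ M) (hc1 : 1 ≤ C) (hcM : C ≤ M) :
    PySem.List.slice? L (some ((C : ℤ) - 1)) (some ((↑(L.length / M) : ℤ) * (M : ℤ))) (M : ℤ)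
      = some ((List.range (L.length / M)).map (fun j => L.getD (C - 1 + M * j) ' ')) := by
  set n := L.length with hn
  set K := n / M with hK
  have hKM : K * M ≤ n := Nat.div_mul_le_self n M
  have hcast : ((K : ℤ)) * (M : ℤ) = ((K * M : ℕ) : ℤ) := by push_cast; ring
  simp only [PySem.List.slice?, PySem.List.sliceIndices, hcast, ← hn]
  rw [if_neg (by omega : ¬ (M : ℤ) = 0)]
  rw [if_pos (by omega : (0:ℤ) < (M:ℤ))]
  simp only [if_neg (by omega : ¬ ((M:ℤ) < 0)),
    if_neg (by omega : ¬ ((C:ℤ) - 1 < 0)),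
    if_neg (by omega : ¬ ((K * M : ℕ) : ℤ) < 0)]
  rw [(by omega : min ((K * M : ℕ) : ℤ) (n : ℤ) = ((K * M : ℕ) : ℤ))]
  rcases Nat.eq_zero_or_pos K with hK0 | hKpos
  · rw [if_neg (by simp [hK0]; omega)]
    simp [hK0]
  · have hMn : M ≤ n := by
      by_contra h
      have : K = 0 := by rw [hK, Nat.div_eq_of_lt (by omega)]
      omega
    have hMKM : M ≤ K * M := Nat.le_mul_of_pos_left M hKpos
    rw [(by omega : min ((C:ℤ) - 1) (n : ℤ) = (C:ℤ) - 1)]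
    rw [if_pos (by omega : (C:ℤ) - 1 < ((K * M : ℕ) : ℤ))]
    rw [(by push_cast; omega : ((K * M : ℕ) : ℤ) - ((C:ℤ) - 1) + (M:ℤ) - 1 = ((M - C + K * M : ℕ) : ℤ))]
    rw [← Int.natCast_div]
    rw [Nat.add_mul_div_right _ _ (by omega : 0 < M), Nat.div_eq_of_lt (by omega : M - C < M)]
    simp only [Int.toNat_natCast, Nat.zero_add]
    refine congrArg some (pv_filterMap_eq_map _ _ _ ?_)
    intro a ha
    rw [List.mem_range] at ha
    have hma : ((M:ℤ)) * (a : ℤ) = ((M * a : ℕ) : ℤ) := by push_cast; ring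
    have hidx : ((C:ℤ) - 1 + (M:ℤ) * (a:ℤ)).toNat = C - 1 + M * a := by rw [hma]; omega
    have h4 : M * (a + 1) = M * a + M := by ring
    have h2 : M * (a + 1) ≤ M * K := Nat.mul_le_mul_left M (by omega)
    have h3 : M * K = K * M := Nat.mul_comm _ _
    have hlt : C - 1 + M * a < n := by omega
    rw [hidx, List.getElem?_eq_getElem (by rw [← hn]; exact hlt),
      List.getD_eq_getElem _ _ (by rw [← hn]; exact hlt)]

-- B's slice? is empty when the string is shorter than one chunk (stop bound k*m = 0)
lemma pv_sliceB_small (L : List Char) (M : ℕ) (c : ℤ) (h1 : 1 ≤ M) (hnM : L.length < M) :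
    PySem.List.slice? L (some (c - 1)) (some ((↑(L.length / M) : ℤ) * (M : ℤ))) (M : ℤ)
      = some [] := by
  have h0 : L.length / M = 0 := Nat.div_eq_of_lt hnM
  simp only [PySem.List.slice?, PySem.List.sliceIndices, h0, Nat.cast_zero, zero_mul]
  rw [if_neg (by omega : ¬ (M : ℤ) = 0)]
  rw [if_pos (by omega : (0:ℤ) < (M:ℤ))]
  simp only [if_neg (by omega : ¬ ((M:ℤ) < 0)), lt_self_iff_false, if_false,
    min_eq_left (by positivity : (0:ℤ) ≤ (L.length : ℤ))]
  split_ifs with h1 h2 h3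
  · exact absurd h2 (by omega)
  · simp
  · exact absurd h3 (by omega)
  · simp

-- B's slice? is empty for a negative step (Pre_'s m ≤ -1 case)
lemma pv_sliceB_neg (L : List Char) (m c : ℤ) (hm : m ≤ -1) :
    PySem.List.slice? L (some (c - 1))
      (some (PySem.Int.floordiv (L.length : ℤ) m * m)) m = some [] := by
  have hk := pv_fdiv_mul_ge (L.length : ℤ) m hm
  simp only [PySem.List.slice?, PySem.List.sliceIndices]
  set k := PySem.Int.floordiv (L.length : ℤ) m with hkdef
  rw [if_neg (by omega : ¬ m = 0)]
  have key : ∀ s e : ℤ, s ≤ e →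
      (if 0 < m then (if s < e then ((e - s + m - 1) / m).toNat else 0)
       else (if e < s then ((s - e + -m - 1) / -m).toNat else 0)) = 0 := by
    intro s e h
    rw [if_neg (by omega), if_neg (by omega)]
  rw [key _ _ (by omega)]
  simp

-- A reduces to the common map form: character c-1 of chunk j is character C-1+M*j of the string
lemma pv_solA (s : String) (M C : ℕ) (hc1 : 1 ≤ C) (hcM : C ≤ M) :
    solution s (M : ℤ) (C : ℤ)
      = String.ofList ((List.range (s.toList.length / M)).map
          (fun j => s.toList.getD (C - 1 + M * j) ' ')) := by
  unfold solution
  simp only [PySem.Str.len_eq, PySem.Int.floordiv_natCast, PySem.List.pyRange_one,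
    PySem.List.foldl_append_singleton_eq_map, List.nil_append, List.map_map,
    Int.sub_zero, Int.toNat_natCast]
  refine congrArg String.ofList (List.map_congr_left ?_)
  intro j hj
  simp only [Function.comp_apply, zero_add]
  rw [(by push_cast; ring : ((j:ℤ)) * (M:ℤ) = ((j * M : ℕ) : ℤ)),
      PySem.List.slice_natCast_add,
      (by omega : ((C:ℤ) - 1) = ((C - 1 : ℕ) : ℤ)),
      PySem.List.pyGetD_natCast]
  simp only [List.getD_eq_getElem?_getD, List.getElem?_take, List.getElem?_drop,
    if_pos (by omega : C - 1 < M)]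
  rw [(by rw [Nat.mul_comm]; omega : j * M + (C - 1) = C - 1 + M * j)]

theorem pv_main (my_string : String) (m c : Int)
    (hpre : Pre_solution my_string m c) :
    solution my_string m c = solution_alt my_string m c := by
  rcases hpre with ⟨hm, hc1, hcm⟩ | hm | ⟨hm, hnm⟩
  · lift m to ℕ using (by omega) with M
    lift c to ℕ using (by omega) with C
    rw [pv_solA my_string M C (by omega) (by omega)]
    unfold solution_alt
    simp only [PySem.Str.len_eq, PySem.Int.floordiv_natCast]
    rw [pv_sliceB my_string.toList M C (by omega) (by omega) (by omega)]
    rfl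
  · unfold solution solution_alt
    simp only [PySem.Str.len_eq]
    have hge := pv_fdiv_mul_ge (my_string.toList.length : ℤ) m hm
    have hk0 : PySem.Int.floordiv (my_string.toList.length : ℤ) m ≤ 0 := by
      by_contra h
      have := mul_le_mul_of_nonpos_right (by omega : (1:ℤ) ≤ PySem.Int.floordiv (my_string.toList.length : ℤ) m) (by omega : m ≤ 0)
      rw [one_mul] at this
      omega
    rw [PySem.List.pyRange_one_eq_nil hk0, pv_sliceB_neg my_string.toList m c hm]
    simp [List.foldl]
  · lift m to ℕ using (by omega) with M
    have hnm' : my_string.toList.length < M := by exact_mod_cast hnm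
    unfold solution solution_alt
    simp only [PySem.Str.len_eq, PySem.Int.floordiv_natCast]
    rw [pv_sliceB_small my_string.toList M c (by omega) hnm']
    rw [Nat.div_eq_of_lt hnm', PySem.List.pyRange_one_eq_nil (by simp)]
    simp [List.foldl]

-- ===== VERDICT (by name: the statement is the Claim_ definition above) =====
theorem solution_spec : Claim_equal_solution := by
  intro s m c _ hpre
  unfold Spec_solution
  exact pv_main s m c hpre
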